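-- pv_equiv track=rewrite | github.com/Destraction/project | backend/app/routers/chat.py | _select_primary_facet_for_question
-- ===== SOURCE A (Python) =====
-- def _select_primary_facet_for_question(facets: list[str]) -> str | None:
--     if not facets:
--         return None
--     priority = ["constraints", "composition", "base", "carbonation", "sweetness", "sourness", "texture", "style", "flavor_profile", "ice_volume"]
--     for item in priority:
--         if item in facets:
--             return item
--     return facets[0]
-- ===== SOURCE B (Python) =====
-- def _select_primary_facet_for_question(facets: list[str]) -> str | None:
--     if not facets:
--         return None
--     priority = ["constraints", "composition", "base", "carbonation", "sweetness", "sourness", "texture", "style", "flavor_profile", "ice_volume"]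
--
--     def rank(f):
--         try:
--             return priority.index(f)
--         except ValueError:
--             return len(priority)
--
--     best = facets[0]
--     for f in facets[1:]:
--         if rank(f) < rank(best):
--             best = f
--     return best
-- ===== Notes on version B (the rewrite author's own statement) =====
-- stated objective: alternative
-- what changed: Instead of scanning the priority list with an inner membership test over facets, B makes a single pass over facets keeping the facet with the lowest priority rank (rank = index in priority, or len(priority) if absent), returning facets[0] when none is ranked.
import Mathlib
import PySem

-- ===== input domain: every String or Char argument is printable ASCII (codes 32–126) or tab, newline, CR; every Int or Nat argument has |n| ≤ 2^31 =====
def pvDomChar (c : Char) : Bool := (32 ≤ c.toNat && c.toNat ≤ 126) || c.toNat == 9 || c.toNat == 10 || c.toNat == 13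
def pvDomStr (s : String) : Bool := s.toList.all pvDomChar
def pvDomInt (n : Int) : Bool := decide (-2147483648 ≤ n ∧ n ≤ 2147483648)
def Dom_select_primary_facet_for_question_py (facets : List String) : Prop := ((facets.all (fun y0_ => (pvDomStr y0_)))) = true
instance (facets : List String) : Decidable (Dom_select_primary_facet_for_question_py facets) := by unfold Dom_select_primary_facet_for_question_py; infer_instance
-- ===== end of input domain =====

-- B replaces A's scan of the priority list (with an inner membership test) by a single
-- pass over facets keeping the lowest-ranked facet; proved to return the same value.


-- the literal priority list both Pythons spell out
def pvPriority : List String := ["constraints", "composition", "base", "carbonation", "sweetness", "sourness", "texture", "style", "flavor_profile", "ice_volume"]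

-- ===== PORT A =====
-- 'for item in priority: if item in facets: return item' then 'return facets[0]'
def pvALoop : List String → List String → Option String
  | [], facets => PySem.List.pyGet? facets 0
  | item :: rest, facets => if facets.contains item then some item else pvALoop rest facets

def select_primary_facet_for_question_py (facets : List String) : Option String :=
  if facets = [] then none else pvALoop pvPriority facets

-- ===== PORT B =====
-- rank(f): priority.index(f), or len(priority) on ValueError
def pvRk (priority : List String) (f : String) : Nat :=
  match PySem.List.index? priority f with
  | some i => i
  | none => priority.length

-- 'best = facets[0]; for f in facets[1:]: if rank(f) < rank(best): best = f'
def pvBest : List String → List String → String → String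
  | _, [], best => best
  | priority, f :: rest, best =>
      if pvRk priority f < pvRk priority best then pvBest priority rest f
      else pvBest priority rest best

def select_primary_facet_for_question_py_alt (facets : List String) : Option String :=
  match facets with
  | [] => none
  | h :: t => some (pvBest pvPriority t h)

-- ===== PRECONDITION & SPEC =====
def Spec_select_primary_facet_for_question_py (facets : List String) (out : Option String) : Prop := out = select_primary_facet_for_question_py_alt facets
instance (facets : List String) (out : Option String) : Decidable (Spec_select_primary_facet_for_question_py facets out) := by unfold Spec_select_primary_facet_for_question_py; infer_instance

-- ===== CLAIM (what is proved, stated in full; the proofs are below) =====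
def Claim_equal_select_primary_facet_for_question_py : Prop := ∀ (facets : List String), Dom_select_primary_facet_for_question_py facets → Spec_select_primary_facet_for_question_py facets (select_primary_facet_for_question_py facets)

-- ===== LEMMAS AND PROOFS =====

-- rank against (q :: P): 0 for q itself, shifted rank otherwise
lemma pvRk_cons_self (q : String) (P : List String) : pvRk (q :: P) q = 0 := by
  unfold pvRk
  rw [PySem.List.index?_cons_self]

lemma pvRk_cons_of_ne (q f : String) (P : List String) (h : f ≠ q) :
    pvRk (q :: P) f = pvRk P f + 1 := by
  unfold pvRk
  rw [PySem.List.index?_cons_of_ne P (Ne.symm h)]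
  cases hx : PySem.List.index? P f <;> simp

lemma pvRk_cons_eq_zero (q f : String) (P : List String) (h : pvRk (q :: P) f = 0) : f = q := by
  by_contra hne
  rw [pvRk_cons_of_ne q f P hne] at h
  omega

-- the loop's result is an element of best :: rest with minimal rank
lemma pvBest_min (P : List String) : ∀ (t : List String) (b : String),
    pvBest P t b ∈ b :: t ∧ ∀ f ∈ b :: t, pvRk P (pvBest P t b) ≤ pvRk P f := by
  intro t
  induction t with
  | nil =>
      intro b
      refine ⟨by simp [pvBest], ?_⟩
      intro f hf
      simp only [List.mem_cons, List.not_mem_nil, or_false] at hf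
      subst hf
      simp [pvBest]
  | cons f rest ih =>
      intro b
      by_cases h : pvRk P f < pvRk P b
      · have H := ih f
        refine ⟨?_, ?_⟩
        · simp only [pvBest, if_pos h]
          exact List.mem_cons_of_mem b H.1
        · intro x hx
          simp only [pvBest, if_pos h]
          rcases List.mem_cons.mp hx with hx | hx
          · subst hx
            exact le_of_lt (lt_of_le_of_lt (H.2 f (by simp)) h)
          · exact H.2 x hx
      · have H := ih b
        refine ⟨?_, ?_⟩
        · simp only [pvBest, if_neg h]
          rcases List.mem_cons.mp H.1 with h1 | h1
          · simp [h1]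
          · exact List.mem_cons_of_mem b (List.mem_cons_of_mem f h1)
        · intro x hx
          simp only [pvBest, if_neg h]
          rcases List.mem_cons.mp hx with hx | hx
          · subst hx
            exact H.2 x (by simp)
          rcases List.mem_cons.mp hx with hx | hx
          · subst hx
            exact le_trans (H.2 b (by simp)) (not_lt.mp h)
          · exact H.2 x (by simp [hx])

-- the loop never moves off b when nothing in t beats it
lemma pvBest_const (P : List String) : ∀ (t : List String) (b : String),
    (∀ f ∈ t, ¬ pvRk P f < pvRk P b) → pvBest P t b = b := by
  intro t
  induction t with
  | nil => intro b _; rfl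
  | cons f rest ih =>
      intro b h
      have hf : ¬ pvRk P f < pvRk P b := h f (by simp)
      simp only [pvBest, if_neg hf]
      exact ih b (fun x hx => h x (by simp [hx]))

-- the loop only compares ranks: congruent rank orders give the same result
lemma pvBest_congr (P1 P2 : List String) : ∀ (t : List String) (b : String),
    (∀ x ∈ b :: t, ∀ y ∈ b :: t, (pvRk P1 x < pvRk P1 y ↔ pvRk P2 x < pvRk P2 y)) →
    pvBest P1 t b = pvBest P2 t b := by
  intro t
  induction t with
  | nil => intro b _; rfl
  | cons f rest ih =>
      intro b h
      have hfb := h f (by simp) b (by simp)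
      by_cases hc : pvRk P1 f < pvRk P1 b
      · simp only [pvBest, if_pos hc, if_pos (hfb.mp hc)]
        apply ih f
        intro x hx y hy
        exact h x (List.mem_cons_of_mem b hx) y (List.mem_cons_of_mem b hy)
      · simp only [pvBest, if_neg hc, if_neg (fun h2 => hc (hfb.mpr h2))]
        apply ih b
        intro x hx y hy
        have hx' : x ∈ b :: f :: rest := by
          rcases List.mem_cons.mp hx with h1 | h1 <;> simp [h1]
        have hy' : y ∈ b :: f :: rest := by
          rcases List.mem_cons.mp hy with h1 | h1 <;> simp [h1]
        exact h x hx' y hy'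

-- main bridge: A's priority scan equals B's fold, for ANY priority list
lemma pvLoop_eq : ∀ (P : List String) (h : String) (t : List String),
    pvALoop P (h :: t) = some (pvBest P t h) := by
  intro P
  induction P with
  | nil =>
      intro h t
      have hb : pvBest [] t h = h :=
        pvBest_const [] t h (by intro f _; simp [pvRk, PySem.List.index?])
      simp [pvALoop, hb]
  | cons q P' ih =>
      intro h t
      by_cases hq : (h :: t).contains q
      · -- q is in facets: both sides return q
        have hqmem : q ∈ h :: t := by simpa using hq
        have hmin := pvBest_min (q :: P') t h
        have h0 : pvRk (q :: P') (pvBest (q :: P') t h) = 0 := by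
          have hle := hmin.2 q hqmem
          rw [pvRk_cons_self] at hle
          omega
        have hbq : pvBest (q :: P') t h = q := pvRk_cons_eq_zero q _ P' h0
        simp only [pvALoop]
        rw [if_pos hq, hbq]
      · -- q is not in facets: all facet ranks shift uniformly by one
        have hne : ∀ x ∈ h :: t, x ≠ q := by
          intro x hx hxq
          subst hxq
          exact hq (by simpa using hx)
        have hcongr : pvBest (q :: P') t h = pvBest P' t h := by
          apply pvBest_congr
          intro x hx y hy
          rw [pvRk_cons_of_ne q x P' (hne x hx), pvRk_cons_of_ne q y P' (hne y hy)]
          omega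
        simp only [pvALoop]
        rw [if_neg hq, hcongr, ih h t]

-- ===== VERDICT (by name: the statement is the Claim_ definition above) =====
theorem select_primary_facet_for_question_py_spec : Claim_equal_select_primary_facet_for_question_py := by
  intro facets _
  unfold Spec_select_primary_facet_for_question_py
  cases facets with
  | nil => rfl
  | cons h t =>
      simp only [select_primary_facet_for_question_py, select_primary_facet_for_question_py_alt,
        if_neg (List.cons_ne_nil h t)]
      exact pvLoop_eq pvPriority h t
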